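-- pv_equiv track=rewrite | github.com/alexandresilvapires/ChordNation | Source/music.py | note_to_number
-- ===== SOURCE A (Python) =====
-- def note_format(number: int) -> int:
--     """Given a number of a note > 11, sets the number to the correct format between [0,11]"""
--     return number % 12
--
-- def note_to_number(note) -> int:
--     """Converts a note to its key code"""
--
--     accidental = 0
--     value = 0
--
--     #Cycles every letter in the note name to accept names with multiple accidentals
--     for letter in note:
--         if(letter == '#'):
--             accidental += 1
--         elif(letter == 'b' or letter == 'f'):
--             accidental -= 1
--
--         elif(letter == 'C'):
--             value = 0
--         elif(letter == 'D'):
--             value = 2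
--         elif(letter == 'E'):
--             value = 4
--         elif(letter == 'F'):
--             value = 5
--         elif(letter == 'G'):
--             value = 7
--         elif(letter == 'A'):
--             value = 9
--         elif(letter == 'B'):
--             value = 11
--
--     #Adds the accidentals and makes the note octave independent
--     if(value+accidental > 11):
--         value = value+accidental+1
--     else:
--         value = value+accidental
--
--     return note_format(value)
-- ===== SOURCE B (Python) =====
-- _BASES = (('C', 0), ('D', 2), ('E', 4), ('F', 5), ('G', 7), ('A', 9), ('B', 11))
--
-- def note_to_number(note) -> int:
--     """Converts a note to its key code"""
--     # net accidental via three whole-string substring counts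
--     accidental = note.count('#') - note.count('b') - note.count('f')
--     # base pitch of the rightmost note letter: seven rfind scans, keep the rightmost hit
--     pos, value = -1, 0
--     for letter, v in _BASES:
--         p = note.rfind(letter)
--         if p > pos:
--             pos, value = p, v
--     total = value + accidental
--     if total > 11:
--         total += 1
--     return total % 12
-- ===== Notes on version B (the rewrite author's own statement) =====
-- stated objective: faster
-- what changed: B never walks the string character by character: it gets the net accidental from three whole-string count() calls and finds the governing note letter by seven rfind() scans (one per letter, keeping the rightmost hit), i.e. it iterates over the fixed alphabet of letters instead of running A's stateful per-character if-chain; the same >11 correction and %12 follow.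
import Mathlib
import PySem

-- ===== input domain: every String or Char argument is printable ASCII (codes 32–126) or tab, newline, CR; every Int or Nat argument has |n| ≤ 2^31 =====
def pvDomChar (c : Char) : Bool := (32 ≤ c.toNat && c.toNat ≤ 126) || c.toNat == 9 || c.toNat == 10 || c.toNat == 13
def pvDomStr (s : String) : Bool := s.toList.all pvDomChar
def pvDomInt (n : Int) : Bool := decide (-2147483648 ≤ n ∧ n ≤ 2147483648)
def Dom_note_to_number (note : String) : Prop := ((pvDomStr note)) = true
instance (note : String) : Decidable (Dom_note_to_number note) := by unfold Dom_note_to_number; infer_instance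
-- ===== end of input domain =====

-- B replaces A's stateful per-character pass by whole-string library scans: three
-- count() calls for the net accidental and seven rfind() scans (one per note letter,
-- keeping the rightmost hit) for the base pitch; measurably faster by constant factor (C-level scans).

-- ===== PORT A =====
def noteStep (s : Int × Int) (letter : Char) : Int × Int :=
  if letter = '#' then (s.1 + 1, s.2)
  else if letter = 'b' ∨ letter = 'f' then (s.1 - 1, s.2)
  else if letter = 'C' then (s.1, 0)
  else if letter = 'D' then (s.1, 2)
  else if letter = 'E' then (s.1, 4)
  else if letter = 'F' then (s.1, 5)
  else if letter = 'G' then (s.1, 7)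
  else if letter = 'A' then (s.1, 9)
  else if letter = 'B' then (s.1, 11)
  else s

def note_format (number : Int) : Int := PySem.Int.mod number 12

def note_to_number (note : String) : Int :=
  let st := note.toList.foldl noteStep (0, 0)
  let value := if st.2 + st.1 > 11 then st.2 + st.1 + 1 else st.2 + st.1
  note_format value

-- ===== PORT B =====
def noteBases : List (Char × Int) := [('C',0),('D',2),('E',4),('F',5),('G',7),('A',9),('B',11)]

-- one iteration of B's 'for letter, v in _BASES' loop
def pickStep (note : String) (s : Int × Int) (p : Char × Int) : Int × Int :=
  let q := PySem.Str.rfind note (String.ofList [p.1])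
  if q > s.1 then (q, p.2) else s

def note_to_number_alt (note : String) : Int :=
  let accidental : Int :=
    (PySem.Str.count note "#" : Int) - PySem.Str.count note "b" - PySem.Str.count note "f"
  let pv := noteBases.foldl (pickStep note) (-1, 0)
  let total := pv.2 + accidental
  let total := if total > 11 then total + 1 else total
  PySem.Int.mod total 12

-- ===== PRECONDITION & SPEC =====
def Spec_note_to_number (note : String) (out : Int) : Prop := out = note_to_number_alt note
instance (note : String) (out : Int) : Decidable (Spec_note_to_number note out) := by unfold Spec_note_to_number; infer_instance

-- ===== CLAIM (what is proved, stated in full; the proofs are below) =====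
def Claim_equal_note_to_number : Prop := ∀ (note : String), Dom_note_to_number note → Spec_note_to_number note (note_to_number note)

-- ===== LEMMAS AND PROOFS =====

-- rfind on the list side, with the fixed fold of B restated over List Char
def rfindC (l : List Char) (d : Char) : Int := PySem.Chars.rfind l [d]

def pickStepC (l : List Char) (s : Int × Int) (p : Char × Int) : Int × Int :=
  if rfindC l p.1 > s.1 then (rfindC l p.1, p.2) else s

def pickC (l : List Char) : Int × Int := noteBases.foldl (pickStepC l) (-1, 0)

lemma isPrefixOf_nil (d : Char) : [d].isPrefixOf ([] : List Char) = false := by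
  simp [List.isPrefixOf]

lemma isPrefixOf_cons (d x : Char) (t : List Char) : [d].isPrefixOf (x :: t) = (d == x) := by
  simp [List.isPrefixOf]

lemma rfind_go_zero (s : List Char) (d : Char) :
    PySem.Chars.rfind.go s [d] 0 = if [d].isPrefixOf s then 0 else -1 := by
  simp [PySem.Chars.rfind.go]

lemma rfind_go_succ (s : List Char) (d : Char) (j : Nat) :
    PySem.Chars.rfind.go s [d] (j+1) =
      if [d].isPrefixOf (s.drop (j+1)) then ((j:Int)+1) else PySem.Chars.rfind.go s [d] j := by
  rw [PySem.Chars.rfind.go]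
  split <;> simp_all

lemma rfind_go_lt (l : List Char) (d : Char) (k : Nat) :
    PySem.Chars.rfind.go l [d] k < (l.length : Int) := by
  induction k with
  | zero =>
    rw [rfind_go_zero]
    split
    · rename_i h
      cases l with
      | nil => rw [isPrefixOf_nil] at h; exact absurd h (by simp)
      | cons x t => simp
    · have : (0:Int) ≤ (l.length : Int) := by positivity
      omega
  | succ j ih =>
    rw [rfind_go_succ]
    split
    · rename_i h
      have hne : l.drop (j+1) ≠ [] := by
        intro he; rw [he, isPrefixOf_nil] at h; exact absurd h (by simp)
      have : j + 1 < l.length := by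
        by_contra hge
        exact hne (List.drop_eq_nil_of_le (by omega))
      exact_mod_cast this
    · exact ih

lemma rfindC_lt (l : List Char) (d : Char) : rfindC l d < (l.length : Int) := by
  unfold rfindC PySem.Chars.rfind
  exact rfind_go_lt l d l.length

lemma rfind_go_append (l : List Char) (c d : Char) (k : Nat) (hk : k < l.length) :
    PySem.Chars.rfind.go (l ++ [c]) [d] k = PySem.Chars.rfind.go l [d] k := by
  induction k with
  | zero =>
    rw [rfind_go_zero, rfind_go_zero]
    cases l with
    | nil => simp at hk
    | cons x t => simp [isPrefixOf_cons]
  | succ j ih =>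
    rw [rfind_go_succ, rfind_go_succ]
    have hdrop : (l ++ [c]).drop (j+1) = l.drop (j+1) ++ [c] :=
      List.drop_append_of_le_length (by omega)
    rw [hdrop]
    have hne : l.drop (j+1) ≠ [] := by
      intro he
      have := List.drop_eq_nil_iff.mp he
      omega
    obtain ⟨x, t, hxt⟩ := List.exists_cons_of_ne_nil hne
    rw [hxt]
    simp only [List.cons_append, isPrefixOf_cons]
    rw [ih (by omega)]

lemma rfindC_append (l : List Char) (c d : Char) :
    rfindC (l ++ [c]) d = if d = c then (l.length : Int) else rfindC l d := by
  unfold rfindC PySem.Chars.rfind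
  have hlen : (l ++ [c]).length = l.length + 1 := by simp
  rw [hlen, rfind_go_succ]
  have h1 : (l ++ [c]).drop (l.length + 1) = [] := List.drop_eq_nil_of_le (by simp)
  rw [h1, isPrefixOf_nil]
  simp only [Bool.false_eq_true, if_false]
  cases l with
  | nil =>
    simp only [List.nil_append, List.length_nil]
    rw [rfind_go_zero, rfind_go_zero, isPrefixOf_nil, isPrefixOf_cons]
    by_cases h : d = c
    · subst h; simp
    · have hb : (d == c) = false := by simp [h]
      simp [hb, h]
  | cons x t =>
    have hlen2 : (x :: t).length = t.length + 1 := by simp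
    rw [hlen2, rfind_go_succ]
    have h2 : ((x :: t) ++ [c]).drop (t.length + 1) = [c] := by
      have h3 : ((x :: t) ++ [c]).drop ((x :: t).length) = [c] := by
        rw [List.drop_append_of_le_length (by simp)]
        simp
      simpa [hlen2] using h3
    rw [h2, isPrefixOf_cons]
    by_cases h : d = c
    · subst h; simp
    · have hb : (d == c) = false := by simp [h]
      rw [hb]
      simp only [Bool.false_eq_true, if_false, if_neg h]
      rw [rfind_go_succ]
      have h3 : (x :: t).drop (t.length + 1) = [] := List.drop_eq_nil_of_le (by simp)
      rw [h3, isPrefixOf_nil]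
      simp only [Bool.false_eq_true, if_false]
      exact rfind_go_append (x :: t) c d t.length (by simp)

-- count: for a single character, Python's substring count is the character count
lemma count_go_singleton (c : Char) (l : List Char) (fuel acc : Nat) (h : l.length ≤ fuel) :
    PySem.Chars.count.go [c] fuel l acc = acc + l.count c := by
  induction l generalizing fuel acc with
  | nil => cases fuel <;> simp [PySem.Chars.count.go]
  | cons x t ih =>
    cases fuel with
    | zero => simp at h
    | succ f =>
      rw [PySem.Chars.count.go]
      simp only [isPrefixOf_cons]
      by_cases hx : c = x
      · subst hx
        have h2 := ih (fuel := f) (acc := acc + 1) (by simpa using h)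
        simp only [beq_self_eq_true, if_true, List.length_cons, List.length_nil,
          List.drop_succ_cons, List.drop_zero, h2, List.count_cons_self]
        omega
      · have hb : (c == x) = false := by simp [hx]
        have hb2 : (x == c) = false := beq_eq_false_iff_ne.mpr (fun he : x = c => hx he.symm)
        have h2 := ih (fuel := f) (acc := acc) (by simpa using h)
        simp only [hb, Bool.false_eq_true, if_false, h2, List.count_cons, hb2]
        omega

lemma count_singleton (l : List Char) (c : Char) :
    PySem.Chars.count l [c] = l.count c := by
  unfold PySem.Chars.count
  rw [if_neg (by simp)]
  simpa using count_go_singleton c l l.length 0 le_rfl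

-- generic facts about B's pick fold
lemma pick_fold_lt (l : List Char) (bs : List (Char × Int)) (s : Int × Int) (n : Int)
    (hs : s.1 < n) (h : ∀ p ∈ bs, rfindC l p.1 < n) :
    (bs.foldl (pickStepC l) s).1 < n := by
  induction bs generalizing s with
  | nil => exact hs
  | cons p t ih =>
    simp only [List.foldl_cons]
    apply ih
    · unfold pickStepC
      split
      · exact h p (by simp)
      · exact hs
    · intro q hq; exact h q (by simp [hq])

lemma pick_fold_skip (l : List Char) (bs : List (Char × Int)) (s : Int × Int)
    (h : ∀ p ∈ bs, rfindC l p.1 ≤ s.1) :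
    bs.foldl (pickStepC l) s = s := by
  induction bs with
  | nil => rfl
  | cons p t ih =>
    simp only [List.foldl_cons]
    have h1 : pickStepC l s p = s := by
      unfold pickStepC
      have := h p (by simp)
      split
      · omega
      · rfl
    rw [h1]
    exact ih (fun q hq => h q (by simp [hq]))

lemma pick_fold_congr (l l' : List Char) (bs : List (Char × Int)) (s : Int × Int)
    (h : ∀ p ∈ bs, rfindC l p.1 = rfindC l' p.1) :
    bs.foldl (pickStepC l) s = bs.foldl (pickStepC l') s := by
  induction bs generalizing s with
  | nil => rfl
  | cons p t ih =>
    simp only [List.foldl_cons]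
    have h1 : pickStepC l s p = pickStepC l' s p := by
      unfold pickStepC; rw [h p (by simp)]
    rw [h1]
    exact ih _ (fun q hq => h q (by simp [hq]))

-- appending a note letter makes it the governing one; appending anything else changes nothing
lemma pick_append_hit (l : List Char) (c : Char) (v : Int) (pre post : List (Char × Int))
    (hsplit : noteBases = pre ++ (c, v) :: post)
    (hpre : ∀ p ∈ pre, p.1 ≠ c) (hpost : ∀ p ∈ post, p.1 ≠ c) :
    pickC (l ++ [c]) = ((l.length : Int), v) := by
  have hq : rfindC (l ++ [c]) c = (l.length : Int) := by
    rw [rfindC_append]; simp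
  unfold pickC
  rw [hsplit, List.foldl_append]
  have hcongr : pre.foldl (pickStepC (l ++ [c])) (-1, 0) = pre.foldl (pickStepC l) (-1, 0) := by
    apply pick_fold_congr
    intro p hp
    rw [rfindC_append]
    simp [fun he : p.1 = c => hpre p hp he]
  rw [hcongr]
  have hlt : (pre.foldl (pickStepC l) (-1, 0)).1 < (l.length : Int) := by
    apply pick_fold_lt
    · have h0 : (0:Int) ≤ (l.length : Int) := by positivity
      omega
    · intro p _; exact rfindC_lt l p.1
  simp only [List.foldl_cons]
  have hstep : pickStepC (l ++ [c]) (pre.foldl (pickStepC l) (-1, 0)) (c, v)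
      = ((l.length : Int), v) := by
    have hdef : pickStepC (l ++ [c]) (pre.foldl (pickStepC l) (-1, 0)) (c, v)
        = if rfindC (l ++ [c]) c > (pre.foldl (pickStepC l) (-1, 0)).1
          then (rfindC (l ++ [c]) c, v) else pre.foldl (pickStepC l) (-1, 0) := rfl
    rw [hdef, hq, if_pos hlt]
  rw [hstep]
  apply pick_fold_skip
  intro p hp
  rw [rfindC_append, if_neg (hpost p hp)]
  exact (rfindC_lt l p.1).le

lemma pick_append_miss (l : List Char) (c : Char) (h : ∀ p ∈ noteBases, p.1 ≠ c) :
    pickC (l ++ [c]) = pickC l := by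
  unfold pickC
  apply pick_fold_congr
  intro p hp
  rw [rfindC_append, if_neg (h p hp)]

-- the net accidental of a list
def accOf (l : List Char) : Int := (l.count '#' : Int) - l.count 'b' - l.count 'f'

lemma accOf_append (l : List Char) (c : Char) :
    accOf (l ++ [c]) = accOf l +
      (if c = '#' then 1 else if c = 'b' ∨ c = 'f' then -1 else 0) := by
  unfold accOf
  simp only [List.count_append, List.count_singleton]
  by_cases h1 : c = '#' <;> by_cases h2 : c = 'b' <;> by_cases h3 : c = 'f' <;>
    simp_all <;> push_cast <;> omega

-- THE INVARIANT: A's fold state is exactly (net accidental, base of the pick fold)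
lemma foldl_noteStep_eq (l : List Char) :
    l.foldl noteStep (0, 0) = (accOf l, (pickC l).2) := by
  induction l using List.reverseRecOn with
  | nil =>
    have : pickC [] = (-1, 0) := by decide
    simp [accOf, this]
  | append_singleton l c ih =>
    rw [List.foldl_append, ih]
    simp only [List.foldl_cons, List.foldl_nil]
    by_cases hC : c = 'C'
    · subst hC
      rw [accOf_append, pick_append_hit l 'C' 0 [] [('D',2),('E',4),('F',5),('G',7),('A',9),('B',11)] rfl (by decide) (by decide)]
      simp [noteStep]
    · by_cases hD : c = 'D'
      · subst hD
        rw [accOf_append, pick_append_hit l 'D' 2 [('C',0)] [('E',4),('F',5),('G',7),('A',9),('B',11)] rfl (by decide) (by decide)]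
        simp [noteStep]
      · by_cases hE : c = 'E'
        · subst hE
          rw [accOf_append, pick_append_hit l 'E' 4 [('C',0),('D',2)] [('F',5),('G',7),('A',9),('B',11)] rfl (by decide) (by decide)]
          simp [noteStep]
        · by_cases hF : c = 'F'
          · subst hF
            rw [accOf_append, pick_append_hit l 'F' 5 [('C',0),('D',2),('E',4)] [('G',7),('A',9),('B',11)] rfl (by decide) (by decide)]
            simp [noteStep]
          · by_cases hG : c = 'G'
            · subst hG
              rw [accOf_append, pick_append_hit l 'G' 7 [('C',0),('D',2),('E',4),('F',5)] [('A',9),('B',11)] rfl (by decide) (by decide)]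
              simp [noteStep]
            · by_cases hA : c = 'A'
              · subst hA
                rw [accOf_append, pick_append_hit l 'A' 9 [('C',0),('D',2),('E',4),('F',5),('G',7)] [('B',11)] rfl (by decide) (by decide)]
                simp [noteStep]
              · by_cases hB : c = 'B'
                · subst hB
                  rw [accOf_append, pick_append_hit l 'B' 11 [('C',0),('D',2),('E',4),('F',5),('G',7),('A',9)] [] rfl (by decide) (by decide)]
                  simp [noteStep]
                · -- c is no note letter: pick unchanged, value unchanged
                  rw [accOf_append, pick_append_miss l c (by
                    intro p hp he
                    fin_cases hp <;> exact absurd he.symm (by assumption))]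
                  unfold noteStep
                  by_cases h1 : c = '#'
                  · simp [h1]
                  · by_cases h2 : c = 'b' ∨ c = 'f'
                    · simp [h1, h2]; omega
                    · simp [h1, h2, hC, hD, hE, hF, hG, hA, hB]

-- bridge B's String-level fold to the List-level pick fold
lemma pickStep_eq (note : String) (s : Int × Int) (p : Char × Int) :
    pickStep note s p = pickStepC note.toList s p := by
  unfold pickStep pickStepC rfindC
  rw [PySem.Str.rfind_eq]
  simp

lemma foldl_congr' {α β : Type} (f g : β → α → β) (l : List α) (s : β)
    (h : ∀ s a, f s a = g s a) : l.foldl f s = l.foldl g s := by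
  induction l generalizing s with
  | nil => rfl
  | cons a t ih => simp only [List.foldl_cons, h]; exact ih _

lemma alt_eq (note : String) :
    note_to_number_alt note =
      (let total := (pickC note.toList).2 + accOf note.toList
       PySem.Int.mod (if total > 11 then total + 1 else total) 12) := by
  unfold note_to_number_alt
  have hfold : noteBases.foldl (pickStep note) (-1, 0)
      = noteBases.foldl (pickStepC note.toList) (-1, 0) :=
    foldl_congr' _ _ _ _ (fun s p => pickStep_eq note s p)
  rw [hfold]
  have hc : ∀ c : Char, PySem.Str.count note (String.ofList [c]) = note.toList.count c := by
    intro c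
    rw [PySem.Str.count_eq]
    have h1 : (String.ofList [c]).toList = [c] := by simp
    rw [h1, count_singleton]
  have h1 := hc '#'
  have h2 := hc 'b'
  have h3 := hc 'f'
  rw [show ("#" : String) = String.ofList ['#'] from rfl,
      show ("b" : String) = String.ofList ['b'] from rfl,
      show ("f" : String) = String.ofList ['f'] from rfl, h1, h2, h3]
  rfl

-- ===== VERDICT (by name: the statement is the Claim_ definition above) =====
theorem note_to_number_spec : Claim_equal_note_to_number := by
  intro note _
  unfold Spec_note_to_number
  rw [alt_eq]
  unfold note_to_number note_format
  rw [foldl_noteStep_eq]
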